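-- pv_equiv track=rewrite | github.com/SeongrokKim/python-practice | programmers/연습문제/인사고과.py | solution
-- ===== SOURCE A (Python) =====
-- def solution(scores):
--     answer = 1
--     num = len(scores)
--     rank = []
--     wanhoA=scores[0][0]
--     wanhoB=scores[0][1]
--     for i, s in enumerate(scores):
--         rank.append([sum(s), s[0], s[1], i])
--     sortRank = sorted(rank, key=lambda x:(-x[1],x[2]))
--     t = 0
--     for score in sortRank:
--         if wanhoA < score[1] and wanhoB < score[2]:
--             return -1
--         if t<=score[2]:
--             if wanhoA+wanhoB < score[1] + score[2]:
--                 answer += 1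
--             t = score[2]
--
--     return answer
-- ===== SOURCE B (Python) =====
-- def solution(scores):
--     wa, wb = scores[0][0], scores[0][1]
--     if any(s[0] > wa and s[1] > wb for s in scores):
--         return -1
--     wt = wa + wb
--     return 1 + sum(
--         1
--         for s in scores
--         if wt < s[0] + s[1]
--         and not any(t[0] > s[0] and t[1] > s[1] for t in scores)
--     )
-- ===== Notes on version B (the rewrite author's own statement) =====
-- stated objective: simpler
-- what changed: Replaced the sort-then-sweep (sort by (-a,b), running max t) with a direct brute-force count: return -1 if anyone strictly dominates Wanho, else 1 + the number of people not strictly dominated by anybody whose total beats Wanho's; no sorting, no mutation.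
-- intended difference: On inputs where Wanho is not disqualified and some Pareto-nondominated person with a negative second score still beats Wanho's total, A's sweep variable t starts at 0 instead of -infinity and silently skips that person, undercounting the rank; B counts them, which is the intended rank. — e.g. on solution([[1, 1], [5, -1]]): A returns 1, B returns 2
import Mathlib
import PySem

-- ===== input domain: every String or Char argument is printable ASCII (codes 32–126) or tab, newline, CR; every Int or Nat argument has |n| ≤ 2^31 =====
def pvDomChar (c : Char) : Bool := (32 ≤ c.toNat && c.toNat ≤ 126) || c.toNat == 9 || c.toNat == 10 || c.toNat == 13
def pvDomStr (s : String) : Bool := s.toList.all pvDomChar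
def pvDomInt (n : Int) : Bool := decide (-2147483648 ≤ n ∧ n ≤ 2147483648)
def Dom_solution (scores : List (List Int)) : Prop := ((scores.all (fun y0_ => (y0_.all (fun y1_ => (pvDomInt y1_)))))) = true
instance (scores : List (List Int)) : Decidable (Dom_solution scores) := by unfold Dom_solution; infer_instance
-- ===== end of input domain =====

-- B replaces A's sort-then-sweep rank computation by a direct brute-force domination count
-- (no sorting, no running maximum); neither version mutates its argument.

-- s[0] / s[1] as A and B read them (default never reached inside Pre_solution)
def g0 (s : List Int) : Int := (PySem.List.pyGet? s 0).getD 0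
def g1 (s : List Int) : Int := (PySem.List.pyGet? s 1).getD 0

-- ===== PORT A =====
-- sum(s)
def pvSum (s : List Int) : Int := s.foldl (· + ·) 0

-- rank entries are the 4-element lists [sum(s), s[0], s[1], i], as a 4-tuple
-- the 'for score in sortRank' loop with its early 'return -1' and state (answer, t)
def loopA (wa wb : Int) : List (Int × Int × Int × Int) → Int → Int → Int
  | [], answer, _t => answer
  | sc :: rest, answer, t =>
    if wa < sc.2.1 ∧ wb < sc.2.2.1 then -1
    else if t ≤ sc.2.2.1 then
      loopA wa wb rest (if wa + wb < sc.2.1 + sc.2.2.1 then answer + 1 else answer) sc.2.2.1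
    else loopA wa wb rest answer t

def solution (scores : List (List Int)) : Int :=
  match (PySem.List.pyGet? scores 0).bind (fun w =>
      (PySem.List.pyGet? w 0).bind fun a => (PySem.List.pyGet? w 1).map fun b => (a, b)) with
  | none => 0  -- Python raises IndexError here; excluded by Pre_solution
  | some (wa, wb) =>
    let rank := (PySem.List.enumerate scores).foldl
      (fun acc p => acc ++ [(pvSum p.2, g0 p.2, g1 p.2, p.1)]) []
    -- sorted(rank, key=lambda x:(-x[1],x[2])): Python tuple comparison = lexicographic
    let sortRank := PySem.List.sorted rank (fun x => toLex (-x.2.1, x.2.2.1))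
    loopA wa wb sortRank 1 0

-- ===== PORT B =====
def solution_alt (scores : List (List Int)) : Int :=
  match (PySem.List.pyGet? scores 0).bind (fun w =>
      (PySem.List.pyGet? w 0).bind fun a => (PySem.List.pyGet? w 1).map fun b => (a, b)) with
  | none => 0  -- Python raises IndexError here; excluded by Pre_solution
  | some (wa, wb) =>
    if scores.any (fun s => decide (wa < g0 s) && decide (wb < g1 s)) then -1
    else
      1 + (scores.countP (fun s =>
            decide (wa + wb < g0 s + g1 s) &&
            !(scores.any (fun t => decide (g0 s < g0 t) && decide (g1 s < g1 t)))) : Int)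

-- ===== PRECONDITION & SPEC =====
-- exactly the inputs where the Python A returns: scores nonempty and every row has ≥ 2 entries
-- (otherwise scores[0][0], s[0] or s[1] raises IndexError)
def Pre_solution (scores : List (List Int)) : Prop :=
  scores ≠ [] ∧ ∀ s ∈ scores, 2 ≤ s.length
instance (scores : List (List Int)) : Decidable (Pre_solution scores) := by
  unfold Pre_solution; infer_instance
def pvWitness_solution : List (List Int) := [[3, 4], [1, 1]]

-- On inputs where Wanho is not disqualified and some Pareto-nondominated person with a negative
-- second score still beats Wanho's total, A's sweep variable t starts at 0 instead of -infinity and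
-- silently skips that person, undercounting the rank; B counts them, which is the intended rank.
def D_solution (scores : List (List Int)) : Prop :=
  (∀ s ∈ scores, ¬ (g0 (scores.headD []) < g0 s ∧ g1 (scores.headD []) < g1 s)) ∧
  ∃ s ∈ scores, g1 s < 0 ∧
    g0 (scores.headD []) + g1 (scores.headD []) < g0 s + g1 s ∧
    ∀ t ∈ scores, ¬ (g0 s < g0 t ∧ g1 s < g1 t)
instance (scores : List (List Int)) : Decidable (D_solution scores) := by
  unfold D_solution; infer_instance

def Spec_solution (scores : List (List Int)) (out : Int) : Prop :=
  ¬ D_solution scores → out = solution_alt scores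
instance (scores : List (List Int)) (out : Int) : Decidable (Spec_solution scores out) := by
  unfold Spec_solution; infer_instance

def pvDiffWitness_solution : List (List Int) := [[1, 1], [5, -1]]
def pvDiffWitnessOut_solution : Int × Int := (1, 2)

-- ===== CLAIM (what is proved, stated in full; the proofs are below) =====
def Claim_unchanged_solution : Prop := ∀ (scores : List (List Int)), Dom_solution scores → Pre_solution scores → Spec_solution scores (solution scores)
def Claim_changed_solution : Prop := Dom_solution (pvDiffWitness_solution) ∧ Pre_solution (pvDiffWitness_solution) ∧ D_solution (pvDiffWitness_solution) ∧ solution (pvDiffWitness_solution) = pvDiffWitnessOut_solution.1 ∧ solution_alt (pvDiffWitness_solution) = pvDiffWitnessOut_solution.2 ∧ pvDiffWitnessOut_solution.1 ≠ pvDiffWitnessOut_solution.2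
def Claim_exact_solution : Prop := ∀ (scores : List (List Int)), Dom_solution scores → Pre_solution scores → D_solution scores → solution scores ≠ solution_alt scores

-- ===== LEMMAS AND PROOFS =====

theorem foldl_app_eq_map {α β : Type} (f : α → β) :
    ∀ (l : List α) (acc : List β),
      l.foldl (fun acc p => acc ++ [f p]) acc = acc ++ l.map f := by
  intro l
  induction l with
  | nil => simp
  | cons x xs ih => intro acc; simp [List.foldl, ih]

theorem loopA_neg (wa wb : Int) :
    ∀ (l : List (Int × Int × Int × Int)) (ans t : Int),
      (∃ x ∈ l, wa < x.2.1 ∧ wb < x.2.2.1) → loopA wa wb l ans t = -1 := by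
  intro l
  induction l with
  | nil => intro ans t h; simp at h
  | cons x xs ih =>
    intro ans t h
    by_cases hx : wa < x.2.1 ∧ wb < x.2.2.1
    · simp [loopA, hx]
    · have hrest : ∃ y ∈ xs, wa < y.2.1 ∧ wb < y.2.2.1 := by
        rcases h with ⟨y, hy, hd⟩
        rcases List.mem_cons.1 hy with rfl | hy'
        · exact absurd hd hx
        · exact ⟨y, hy', hd⟩
      by_cases ht : t ≤ x.2.2.1 <;> simp [loopA, hx, ht, ih _ _ hrest]

theorem exists_max_key {α : Type} (f : α → Int) :
    ∀ (l : List α), l ≠ [] → ∃ m ∈ l, ∀ y ∈ l, f y ≤ f m := by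
  intro l
  induction l with
  | nil => intro h; exact absurd rfl h
  | cons x xs ih =>
    intro _
    rcases eq_or_ne xs [] with rfl | hne
    · exact ⟨x, List.mem_cons_self, by simp⟩
    · rcases ih hne with ⟨m, hm, hmax⟩
      rcases le_total (f m) (f x) with h | h
      · refine ⟨x, List.mem_cons_self, ?_⟩
        intro y hy
        rcases List.mem_cons.1 hy with rfl | hy'
        · exact le_refl _
        · exact le_trans (hmax y hy') h
      · refine ⟨m, List.mem_cons_of_mem _ hm, ?_⟩
        intro y hy
        rcases List.mem_cons.1 hy with rfl | hy'
        · exact h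
        · exact hmax y hy'

theorem exists_nondom_dom (F : List (Int × Int × Int × Int)) (x : Int × Int × Int × Int)
    (h : ∃ y ∈ F, x.2.1 < y.2.1 ∧ x.2.2.1 < y.2.2.1) :
    ∃ z ∈ F, (x.2.1 < z.2.1 ∧ x.2.2.1 < z.2.2.1) ∧
      ∀ u ∈ F, ¬ (z.2.1 < u.2.1 ∧ z.2.2.1 < u.2.2.1) := by
  classical
  set ds := F.filter (fun y => decide (x.2.1 < y.2.1) && decide (x.2.2.1 < y.2.2.1)) with hds
  have hne : ds ≠ [] := by
    rcases h with ⟨y, hy, hd⟩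
    have : y ∈ ds := by
      rw [hds, List.mem_filter]
      exact ⟨hy, by simp [hd.1, hd.2]⟩
    exact List.ne_nil_of_mem this
  rcases exists_max_key (fun y => y.2.2.1) ds hne with ⟨m, hm, hmax⟩
  have hmF : m ∈ F := (List.mem_filter.1 hm).1
  have hmd : x.2.1 < m.2.1 ∧ x.2.2.1 < m.2.2.1 := by
    have := (List.mem_filter.1 hm).2
    simp at this; exact this
  refine ⟨m, hmF, hmd, ?_⟩
  intro u hu hcon
  have huds : u ∈ ds := by
    rw [hds, List.mem_filter]
    exact ⟨hu, by simp [lt_trans hmd.1 hcon.1, lt_trans hmd.2 hcon.2]⟩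
  have := hmax u huds
  simp at this
  omega

theorem sweep (wa wb : Int) (F : List (Int × Int × Int × Int))
    (hpair : F.Pairwise (fun p q =>
      (toLex (-p.2.1, p.2.2.1) : Lex (Int × Int)) ≤ toLex (-q.2.1, q.2.2.1)))
    (hnw : ∀ y ∈ F, ¬ (wa < y.2.1 ∧ wb < y.2.2.1)) :
    ∀ (l pre : List (Int × Int × Int × Int)) (t ans : Int), F = pre ++ l →
      0 ≤ t →
      (∀ y ∈ pre, (∀ u ∈ F, ¬ (y.2.1 < u.2.1 ∧ y.2.2.1 < u.2.2.1)) → y.2.2.1 ≤ t) →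
      (t = 0 ∨ ∃ y ∈ pre, (∀ u ∈ F, ¬ (y.2.1 < u.2.1 ∧ y.2.2.1 < u.2.2.1)) ∧ y.2.2.1 = t) →
      loopA wa wb l ans t = ans + (l.countP (fun x =>
        decide (0 ≤ x.2.2.1) &&
        decide (∀ u ∈ F, ¬ (x.2.1 < u.2.1 ∧ x.2.2.1 < u.2.2.1)) &&
        decide (wa + wb < x.2.1 + x.2.2.1)) : Int) := by
  intro l
  induction l with
  | nil => intro pre t ans _ _ _ _; simp [loopA]
  | cons x rest ih =>
    intro pre t ans hF ht0 hinv2 hinv3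
    have hpairF := hF ▸ hpair
    have hsplit := List.pairwise_append.1 hpairF
    have hpre_x : ∀ p ∈ pre,
        (toLex (-p.2.1, p.2.2.1) : Lex (Int × Int)) ≤ toLex (-x.2.1, x.2.2.1) :=
      fun p hp => hsplit.2.2 p hp x List.mem_cons_self
    have hx_rest : ∀ r ∈ rest,
        (toLex (-x.2.1, x.2.2.1) : Lex (Int × Int)) ≤ toLex (-r.2.1, r.2.2.1) :=
      fun r hr => (List.pairwise_cons.1 hsplit.2.1).1 r hr
    have hxF : x ∈ F := by rw [hF]; exact List.mem_append_right _ List.mem_cons_self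
    have hnx : ¬ (wa < x.2.1 ∧ wb < x.2.2.1) := hnw x hxF
    have hiff : t ≤ x.2.2.1 ↔
        (0 ≤ x.2.2.1 ∧ ∀ u ∈ F, ¬ (x.2.1 < u.2.1 ∧ x.2.2.1 < u.2.2.1)) := by
      constructor
      · intro hle
        refine ⟨le_trans ht0 hle, ?_⟩
        by_contra hdom
        push Not at hdom
        rcases hdom with ⟨y, hy, hya, hyb⟩
        rcases exists_nondom_dom F x ⟨y, hy, hya, hyb⟩ with ⟨z, hzF, hzd, hznd⟩
        have hzpre : z ∈ pre := by
          rcases (List.mem_append.1 (hF ▸ hzF)) with h | h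
          · exact h
          · rcases List.mem_cons.1 h with rfl | h'
            · exact absurd hzd.1 (lt_irrefl _)
            · have := hx_rest z h'
              rw [Prod.Lex.toLex_le_toLex] at this
              omega
        have := hinv2 z hzpre hznd
        omega
      · rintro ⟨hb0, hnd⟩
        rcases hinv3 with rfl | ⟨y, hy, hynd, rfl⟩
        · exact hb0
        · have hkey := hpre_x y hy
          rw [Prod.Lex.toLex_le_toLex] at hkey
          by_contra hlt
          push Not at hlt
          have hya : x.2.1 < y.2.1 := by omega
          have hyF : y ∈ F := by rw [hF]; exact List.mem_append_left _ hy
          exact hnd y hyF ⟨hya, hlt⟩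
    have hFassoc : F = (pre ++ [x]) ++ rest := by rw [hF]; simp
    by_cases hbr : t ≤ x.2.2.1
    · obtain ⟨hb0, hnd⟩ := hiff.1 hbr
      have ih' := ih (pre ++ [x]) x.2.2.1
        (if wa + wb < x.2.1 + x.2.2.1 then ans + 1 else ans) hFassoc hb0
        (by
          intro y hy hynd
          rcases List.mem_append.1 hy with h | h
          · exact le_trans (hinv2 y h hynd) hbr
          · rcases List.mem_singleton.1 h with rfl; exact le_refl _)
        (Or.inr ⟨x, List.mem_append_right _ (List.mem_singleton.2 rfl), hnd, rfl⟩)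
      have hd1 : (decide (∀ u ∈ F, ¬ (x.2.1 < u.2.1 ∧ x.2.2.1 < u.2.2.1))) = true :=
        decide_eq_true hnd
      simp only [loopA, if_neg hnx, if_pos hbr, ih', List.countP_cons]
      by_cases hsum : wa + wb < x.2.1 + x.2.2.1 <;>
        simp [hsum, hd1, decide_eq_true hb0] <;> push_cast <;> ring
    · have hcnt : ¬ (0 ≤ x.2.2.1 ∧ ∀ u ∈ F, ¬ (x.2.1 < u.2.1 ∧ x.2.2.1 < u.2.2.1)) :=
        fun h => hbr (hiff.2 h)
      have ih' := ih (pre ++ [x]) t ans hFassoc ht0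
        (by
          intro y hy hynd
          rcases List.mem_append.1 hy with h | h
          · exact hinv2 y h hynd
          · rcases List.mem_singleton.1 h with rfl
            by_cases hb0 : 0 ≤ y.2.2.1
            · exact absurd (hiff.2 ⟨hb0, hynd⟩) hbr
            · omega)
        (by
          rcases hinv3 with h | ⟨y, hy, hynd, h⟩
          · exact Or.inl h
          · exact Or.inr ⟨y, List.mem_append_left _ hy, hynd, h⟩)
      simp only [loopA, if_neg hnx, if_neg hbr, ih', List.countP_cons]
      have : (decide (0 ≤ x.2.2.1) &&
          decide (∀ u ∈ F, ¬ (x.2.1 < u.2.1 ∧ x.2.2.1 < u.2.2.1)) &&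
          decide (wa + wb < x.2.1 + x.2.2.1)) = false := by
        by_contra h
        rw [Bool.not_eq_false] at h
        simp only [Bool.and_eq_true, decide_eq_true_eq] at h
        exact hcnt ⟨h.1.1, h.1.2⟩
      simp [this]

theorem countP_lt {α : Type} (p q : α → Bool) :
    ∀ (l : List α), (∀ a ∈ l, p a = true → q a = true) →
      (∃ a ∈ l, p a = false ∧ q a = true) → l.countP p < l.countP q := by
  intro l
  induction l with
  | nil => intro _ h; simp at h
  | cons x xs ih =>
    intro hmono hex
    have hmono' : ∀ a ∈ xs, p a = true → q a = true :=
      fun a ha => hmono a (List.mem_cons_of_mem _ ha)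
    have hle : xs.countP p ≤ xs.countP q :=
      List.countP_mono_left fun a ha => hmono' a ha
    rcases hex with ⟨a, ha, hpa, hqa⟩
    rcases List.mem_cons.1 ha with rfl | ha'
    · simp [List.countP_cons, hpa, hqa]; omega
    · have := ih hmono' ⟨a, ha', hpa, hqa⟩
      simp [List.countP_cons]
      rcases hp : p x with _ | _ <;> rcases hq : q x with _ | _ <;> simp <;> try omega
      · exact absurd (hmono x List.mem_cons_self hp) (by simp [hq])

-- the rank list A builds, as a map
def rankOf (scores : List (List Int)) : List (Int × Int × Int × Int) :=
  (PySem.List.enumerate scores).map (fun p => (pvSum p.2, g0 p.2, g1 p.2, p.1))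

theorem exists_rank_iff (scores : List (List Int)) (P : Int → Int → Prop) :
    (∃ y ∈ rankOf scores, P y.2.1 y.2.2.1) ↔ ∃ s ∈ scores, P (g0 s) (g1 s) := by
  constructor
  · rintro ⟨y, hy, hP⟩
    rcases List.mem_map.1 hy with ⟨p, hp, rfl⟩
    refine ⟨p.2, ?_, hP⟩
    have := PySem.List.map_snd_enumerate scores 0
    rw [← this]
    exact List.mem_map_of_mem hp
  · rintro ⟨s, hs, hP⟩
    rw [← PySem.List.map_snd_enumerate scores 0] at hs
    rcases List.mem_map.1 hs with ⟨p, hp, rfl⟩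
    exact ⟨_, List.mem_map_of_mem hp, hP⟩

theorem forall_rank_iff (scores : List (List Int)) (P : Int → Int → Prop) :
    (∀ y ∈ rankOf scores, P y.2.1 y.2.2.1) ↔ ∀ s ∈ scores, P (g0 s) (g1 s) := by
  constructor
  · intro h s hs
    rw [← PySem.List.map_snd_enumerate scores 0] at hs
    rcases List.mem_map.1 hs with ⟨p, hp, rfl⟩
    exact h _ (List.mem_map_of_mem hp)
  · rintro h y hy
    rcases List.mem_map.1 hy with ⟨p, hp, rfl⟩
    refine h p.2 ?_
    rw [← PySem.List.map_snd_enumerate scores 0]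
    exact List.mem_map_of_mem hp

theorem countP_rank (scores : List (List Int)) (p : Int → Int → Bool) :
    (rankOf scores).countP (fun y => p y.2.1 y.2.2.1) = scores.countP (fun s => p (g0 s) (g1 s)) := by
  rw [rankOf, List.countP_map]
  conv_rhs => rw [← PySem.List.map_snd_enumerate scores 0, List.countP_map]
  rfl

-- closed count predicates
def cntS (wt : Int) (scores : List (List Int)) (s : List Int) : Bool :=
  decide (0 ≤ g1 s) && decide (∀ t ∈ scores, ¬ (g0 s < g0 t ∧ g1 s < g1 t)) &&
    decide (wt < g0 s + g1 s)
def cntB (wt : Int) (scores : List (List Int)) (s : List Int) : Bool :=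
  decide (wt < g0 s + g1 s) &&
    !(scores.any (fun t => decide (g0 s < g0 t) && decide (g1 s < g1 t)))

theorem rank_foldl (scores : List (List Int)) :
    (PySem.List.enumerate scores).foldl
      (fun acc p => acc ++ [(pvSum p.2, g0 p.2, g1 p.2, p.1)]) [] = rankOf scores := by
  rw [rankOf]
  simpa using foldl_app_eq_map (fun p : Int × List Int => (pvSum p.2, g0 p.2, g1 p.2, p.1))
    (PySem.List.enumerate scores) []

theorem head_get (a b : Int) (u : List Int) (rest : List (List Int)) :
    (PySem.List.pyGet? ((a :: b :: u) :: rest) 0).bind (fun w =>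
      (PySem.List.pyGet? w 0).bind fun x => (PySem.List.pyGet? w 1).map fun y => (x, y))
      = some (a, b) := by
  have h0 : PySem.List.pyGet? ((a :: b :: u) :: rest) (0 : Int) = some (a :: b :: u) := by
    simpa using PySem.List.pyGet?_natCast ((a :: b :: u) :: rest) 0
  have hw0 : PySem.List.pyGet? (a :: b :: u) (0 : Int) = some a := by
    simpa using PySem.List.pyGet?_natCast (a :: b :: u) 0
  have hw1 : PySem.List.pyGet? (a :: b :: u) (1 : Int) = some b := by
    simpa using PySem.List.pyGet?_natCast (a :: b :: u) 1
  rw [h0, Option.bind_some, hw0, Option.bind_some, hw1, Option.map_some]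

theorem eval_A (a b : Int) (u : List Int) (rest : List (List Int)) :
    solution ((a :: b :: u) :: rest) =
      loopA a b (PySem.List.sorted (rankOf ((a :: b :: u) :: rest))
        (fun x => toLex (-x.2.1, x.2.2.1))) 1 0 := by
  rw [solution, head_get, rank_foldl]

theorem A_neg (a b : Int) (u : List Int) (rest : List (List Int))
    (h : ∃ s ∈ (a :: b :: u) :: rest, a < g0 s ∧ b < g1 s) :
    solution ((a :: b :: u) :: rest) = -1 := by
  rw [eval_A]
  apply loopA_neg
  have := (exists_rank_iff ((a :: b :: u) :: rest) (fun x y => a < x ∧ b < y)).2 h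
  rcases this with ⟨y, hy, hP⟩
  exact ⟨y, (PySem.List.mem_sorted _ _ _ _).2 hy, hP⟩

theorem B_neg (a b : Int) (u : List Int) (rest : List (List Int))
    (h : ∃ s ∈ (a :: b :: u) :: rest, a < g0 s ∧ b < g1 s) :
    solution_alt ((a :: b :: u) :: rest) = -1 := by
  rw [solution_alt, head_get]
  have hany : ((a :: b :: u) :: rest).any
      (fun s => decide (a < g0 s) && decide (b < g1 s)) = true := by
    rcases h with ⟨s, hs, h1, h2⟩
    exact List.any_eq_true.2 ⟨s, hs, by simp [h1, h2]⟩
  simp [hany]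

theorem A_pos (a b : Int) (u : List Int) (rest : List (List Int))
    (h : ¬ ∃ s ∈ (a :: b :: u) :: rest, a < g0 s ∧ b < g1 s) :
    solution ((a :: b :: u) :: rest) =
      1 + (((a :: b :: u) :: rest).countP (cntS (a + b) ((a :: b :: u) :: rest)) : Int) := by
  have hscores : ∀ s ∈ (a :: b :: u) :: rest, ¬ (a < g0 s ∧ b < g1 s) := by
    intro s hs hd; exact h ⟨s, hs, hd⟩
  rw [eval_A]
  set sc := (a :: b :: u) :: rest with hsc
  set F := PySem.List.sorted (rankOf sc) (fun x => toLex (-x.2.1, x.2.2.1)) with hFdef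
  have hpair : F.Pairwise (fun p q =>
      (toLex (-p.2.1, p.2.2.1) : Lex (Int × Int)) ≤ toLex (-q.2.1, q.2.2.1)) :=
    PySem.List.sorted_pairwise (rankOf sc) (fun x => toLex (-x.2.1, x.2.2.1))
  have hnw : ∀ y ∈ F, ¬ (a < y.2.1 ∧ b < y.2.2.1) := by
    intro y hy
    exact (forall_rank_iff sc (fun x y => ¬ (a < x ∧ b < y))).2 hscores y
      ((PySem.List.mem_sorted _ _ _ _).1 hy)
  rw [sweep a b F hpair hnw F [] 0 1 rfl (le_refl 0) (by simp) (Or.inl rfl)]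
  congr 1
  -- replace the inner ∀ u ∈ F by ∀ t ∈ sc
  have hstep : F.countP (fun x =>
        decide (0 ≤ x.2.2.1) &&
        decide (∀ u ∈ F, ¬ (x.2.1 < u.2.1 ∧ x.2.2.1 < u.2.2.1)) &&
        decide (a + b < x.2.1 + x.2.2.1)) =
      F.countP (fun x =>
        decide (0 ≤ x.2.2.1) &&
        decide (∀ t ∈ sc, ¬ (x.2.1 < g0 t ∧ x.2.2.1 < g1 t)) &&
        decide (a + b < x.2.1 + x.2.2.1)) := by
    apply List.countP_congr
    intro x _
    have hiff : (∀ u ∈ F, ¬ (x.2.1 < u.2.1 ∧ x.2.2.1 < u.2.2.1)) ↔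
        (∀ t ∈ sc, ¬ (x.2.1 < g0 t ∧ x.2.2.1 < g1 t)) := by
      constructor
      · intro hf
        refine (forall_rank_iff sc (fun p q => ¬ (x.2.1 < p ∧ x.2.2.1 < q))).1 ?_
        intro y hy; exact hf y ((PySem.List.mem_sorted _ _ _ _).2 hy)
      · intro hf y hy
        exact (forall_rank_iff sc (fun p q => ¬ (x.2.1 < p ∧ x.2.2.1 < q))).2 hf y
          ((PySem.List.mem_sorted _ _ _ _).1 hy)
    rw [decide_eq_decide.2 hiff]
  rw [hstep]
  rw [(PySem.List.sorted_perm (rankOf sc) (fun x => toLex (-x.2.1, x.2.2.1)) false).countP_eq]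
  have := countP_rank sc (fun p q =>
    decide (0 ≤ q) && decide (∀ t ∈ sc, ¬ (p < g0 t ∧ q < g1 t)) && decide (a + b < p + q))
  rw [this]
  rfl

theorem B_pos (a b : Int) (u : List Int) (rest : List (List Int))
    (h : ¬ ∃ s ∈ (a :: b :: u) :: rest, a < g0 s ∧ b < g1 s) :
    solution_alt ((a :: b :: u) :: rest) =
      1 + (((a :: b :: u) :: rest).countP (cntB (a + b) ((a :: b :: u) :: rest)) : Int) := by
  rw [solution_alt, head_get]
  have hany : ((a :: b :: u) :: rest).any
      (fun s => decide (a < g0 s) && decide (b < g1 s)) = false := by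
    rw [List.any_eq_false]
    intro s hs
    simp only [Bool.and_eq_true, decide_eq_true_eq, not_and]
    intro h1 h2
    exact h ⟨s, hs, h1, h2⟩
  simp only [hany, Bool.false_eq_true, if_false]
  rfl
theorem g0_cons (x : Int) (l : List Int) : g0 (x :: l) = x := by
  simp [g0, show PySem.List.pyGet? (x :: l) (0 : Int) = some x from by
    simpa using PySem.List.pyGet?_natCast (x :: l) 0]

theorem g1_cons (x y : Int) (l : List Int) : g1 (x :: y :: l) = y := by
  simp [g1, show PySem.List.pyGet? (x :: y :: l) (1 : Int) = some y from by
    simpa using PySem.List.pyGet?_natCast (x :: y :: l) 1]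

theorem D_iff (a b : Int) (u : List Int) (rest : List (List Int)) :
    D_solution ((a :: b :: u) :: rest) ↔
      (∀ s ∈ (a :: b :: u) :: rest, ¬ (a < g0 s ∧ b < g1 s)) ∧
      ∃ s ∈ (a :: b :: u) :: rest, g1 s < 0 ∧ a + b < g0 s + g1 s ∧
        ∀ t ∈ (a :: b :: u) :: rest, ¬ (g0 s < g0 t ∧ g1 s < g1 t) := by
  unfold D_solution
  rw [List.headD_cons, g0_cons, g1_cons a b u]

theorem solution_spec' (scores : List (List Int)) (hpre : Pre_solution scores) :
    Spec_solution scores (solution scores) := by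
  obtain ⟨hne, hlen⟩ := hpre
  intro hnD
  rcases scores with _ | ⟨w, rest⟩
  · exact absurd rfl hne
  rcases w with _ | ⟨a, w'⟩
  · have := hlen [] List.mem_cons_self; simp at this
  rcases w' with _ | ⟨b, u⟩
  · have := hlen [a] List.mem_cons_self; simp at this
  by_cases hcase : ∃ s ∈ (a :: b :: u) :: rest, a < g0 s ∧ b < g1 s
  · rw [A_neg _ _ _ _ hcase, B_neg _ _ _ _ hcase]
  · have hC1 : ∀ s ∈ (a :: b :: u) :: rest, ¬ (a < g0 s ∧ b < g1 s) :=
      fun s hs hd => hcase ⟨s, hs, hd⟩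
    have hC2 : ¬ ∃ s ∈ (a :: b :: u) :: rest, g1 s < 0 ∧ a + b < g0 s + g1 s ∧
        ∀ t ∈ (a :: b :: u) :: rest, ¬ (g0 s < g0 t ∧ g1 s < g1 t) :=
      fun hex => hnD ((D_iff a b u rest).2 ⟨hC1, hex⟩)
    rw [A_pos _ _ _ _ hcase, B_pos _ _ _ _ hcase]
    have hcnt : (((a :: b :: u) :: rest).countP (cntS (a + b) ((a :: b :: u) :: rest))) =
        ((a :: b :: u) :: rest).countP (cntB (a + b) ((a :: b :: u) :: rest)) := by
      apply List.countP_congr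
      intro s hs
      by_cases h1 : a + b < g0 s + g1 s
      · by_cases h2 : ∀ t ∈ (a :: b :: u) :: rest, ¬ (g0 s < g0 t ∧ g1 s < g1 t)
        · have hany : (((a :: b :: u) :: rest).any
              (fun t => decide (g0 s < g0 t) && decide (g1 s < g1 t))) = false := by
            rw [List.any_eq_false]; intro t ht; simpa using h2 t ht
          by_cases h3 : 0 ≤ g1 s
          · have e1 : cntS (a + b) ((a :: b :: u) :: rest) s = true := by
              unfold cntS; rw [decide_eq_true h3, decide_eq_true h2, decide_eq_true h1]; rfl
            have e2 : cntB (a + b) ((a :: b :: u) :: rest) s = true := by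
              unfold cntB; rw [decide_eq_true h1, hany]; rfl
            rw [e1, e2]
          · exact absurd ⟨s, hs, by omega, h1, h2⟩ hC2
        · have hany : (((a :: b :: u) :: rest).any
              (fun t => decide (g0 s < g0 t) && decide (g1 s < g1 t))) = true := by
            rw [List.any_eq_true]
            push Not at h2
            rcases h2 with ⟨t, ht, hd⟩
            exact ⟨t, ht, by simp [hd.1, hd.2]⟩
          have e1 : cntS (a + b) ((a :: b :: u) :: rest) s = false := by
            unfold cntS; rw [decide_eq_false h2]; simp
          have e2 : cntB (a + b) ((a :: b :: u) :: rest) s = false := by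
            unfold cntB; rw [hany]; simp
          rw [e1, e2]
      · have e1 : cntS (a + b) ((a :: b :: u) :: rest) s = false := by
          unfold cntS; rw [decide_eq_false h1]; simp
        have e2 : cntB (a + b) ((a :: b :: u) :: rest) s = false := by
          unfold cntB; rw [decide_eq_false h1]; simp
        rw [e1, e2]
    rw [hcnt]

theorem solution_tight' (scores : List (List Int)) (hpre : Pre_solution scores)
    (hD : D_solution scores) : solution scores ≠ solution_alt scores := by
  obtain ⟨hne, hlen⟩ := hpre
  rcases scores with _ | ⟨w, rest⟩
  · exact absurd rfl hne
  rcases w with _ | ⟨a, w'⟩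
  · have := hlen [] List.mem_cons_self; simp at this
  rcases w' with _ | ⟨b, u⟩
  · have := hlen [a] List.mem_cons_self; simp at this
  rcases (D_iff a b u rest).1 hD with ⟨hC1, s0, hs0, hb0, hsum0, hnd0⟩
  have hcase : ¬ ∃ s ∈ (a :: b :: u) :: rest, a < g0 s ∧ b < g1 s :=
    fun ⟨s, hs, hd⟩ => hC1 s hs hd
  rw [A_pos _ _ _ _ hcase, B_pos _ _ _ _ hcase]
  have hany0 : (((a :: b :: u) :: rest).any
      (fun t => decide (g0 s0 < g0 t) && decide (g1 s0 < g1 t))) = false := by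
    rw [List.any_eq_false]; intro t ht; simpa using hnd0 t ht
  have hlt : (((a :: b :: u) :: rest).countP (cntS (a + b) ((a :: b :: u) :: rest))) <
      ((a :: b :: u) :: rest).countP (cntB (a + b) ((a :: b :: u) :: rest)) := by
    apply countP_lt
    · intro x hx hpx
      simp only [cntS, Bool.and_eq_true, decide_eq_true_eq] at hpx
      obtain ⟨⟨h3, h2⟩, h1⟩ := hpx
      have hany : (((a :: b :: u) :: rest).any
          (fun t => decide (g0 x < g0 t) && decide (g1 x < g1 t))) = false := by
        rw [List.any_eq_false]; intro t ht; simpa using h2 t ht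
      unfold cntB; rw [decide_eq_true h1, hany]; rfl
    · refine ⟨s0, hs0, ?_, ?_⟩
      · unfold cntS; rw [decide_eq_false (by omega : ¬ 0 ≤ g1 s0)]; simp
      · unfold cntB; rw [decide_eq_true hsum0, hany0]; rfl
  intro heq
  omega

-- ===== VERDICT (by name: the statement is the Claim_ definition above) =====
theorem solution_spec : Claim_unchanged_solution := by
  intro scores _hdom hpre
  exact solution_spec' scores hpre

theorem solution_changed : Claim_changed_solution := by
  unfold Claim_changed_solution; decide

theorem solution_tight : Claim_exact_solution := by
  intro scores _hdom hpre hD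
  exact solution_tight' scores hpre hD
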